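-- pv_equiv track=rewrite | github.com/eleans412/Code-wars-tinkering | aerial_firefighting/aerial.py | waterbombs
-- ===== SOURCE A (Python) =====
-- import math
--
-- def waterbombs(fire, w):
--     num_of_bombs = 0
--
--
--     fire_list = list(fire)
--     fires_passed = []
--
--     fire_count = 0
--     i = 0
--     while i < len(fire_list):
--         if fire_list[i] == 'x' and i == len(fire_list) - 1:
--             fire_count += 1
--             fires_passed.append(fire_count)
--
--         if i < len(fire_list) - 1 and fire_list[i] == 'x' and fire_list[i + 1] != 'Y':
--             fire_count += 1
--
--         if i < len(fire_list) - 1 and fire_list[i] == 'x' and fire_list[i + 1] == 'Y':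
--             fire_count += 1
--             fires_passed.append(fire_count)
--             fire_count = 0
--
--         if fire_list[i] == 'Y':
--             fire_count = 0
--
--         i += 1
--
--     for f in fires_passed:
--         num_of_bombs += math.ceil(f/w)
--
--
--     return num_of_bombs
-- ===== SOURCE B (Python) =====
-- def waterbombs(fire, w):
--     total = 0
--     for group in fire.split('Y'):
--         if group.endswith('x'):
--             total += -(-group.count('x') // w)
--     return total
-- ===== Notes on version B (the rewrite author's own statement) =====
-- stated objective: simpler
-- what changed: Replaces A's index-based lookahead state machine (manual counter, flush list, then a summing pass) by split('Y') segmentation: each group contributes the ceiling of its 'x'-count over w exactly when it ends in 'x' (the only case in which A's counter is flushed), using integer ceiling division -(-c//w) instead of float-based math.ceil; the C-level str.split/str.count make it measurably faster too.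
import Mathlib
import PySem

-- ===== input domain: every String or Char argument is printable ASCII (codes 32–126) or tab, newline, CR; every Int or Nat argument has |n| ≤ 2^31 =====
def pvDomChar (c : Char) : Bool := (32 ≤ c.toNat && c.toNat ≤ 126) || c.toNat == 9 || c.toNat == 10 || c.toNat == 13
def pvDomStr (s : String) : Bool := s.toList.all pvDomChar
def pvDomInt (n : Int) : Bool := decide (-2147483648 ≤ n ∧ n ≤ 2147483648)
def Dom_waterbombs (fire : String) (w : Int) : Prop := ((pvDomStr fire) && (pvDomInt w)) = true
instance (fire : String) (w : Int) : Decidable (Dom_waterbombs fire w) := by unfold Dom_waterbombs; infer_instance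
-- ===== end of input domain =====

-- B replaces A's index-based lookahead state machine by split('Y') segmentation with integer
-- ceiling division (objective: simpler); math.ceil(f/w) is ported as exact integer ceiling
-- -((-f)//w), which equals the float computation for the group sizes/divisors of this domain.

-- ===== PORT A =====
-- math.ceil(f/w): exact integer ceiling; equals Python's float-based value on this domain (w ≠ 0 by Pre_)
def pvCeilDiv (a b : Int) : Int := -(PySem.Int.floordiv (-a) b)

-- the while loop over i: structural recursion over the char list, same state (fire_count, fires_passed);
-- fire_list[i+1] is the head of the remaining list
def wbLoop : List Char → Int → List Int → List Int
  | [], _, fp => fp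
  | c :: rest, fc, fp =>
    -- if fire_list[i] == 'x' and i == len(fire_list) - 1
    let s1 : Int × List Int := if c = 'x' ∧ rest = [] then (fc + 1, fp ++ [fc + 1]) else (fc, fp)
    -- if i < len - 1 and fire_list[i] == 'x' and fire_list[i+1] != 'Y'
    let s2 : Int × List Int :=
      if rest ≠ [] ∧ c = 'x' ∧ rest.headD ' ' ≠ 'Y' then (s1.1 + 1, s1.2) else s1
    -- if i < len - 1 and fire_list[i] == 'x' and fire_list[i+1] == 'Y'
    let s3 : Int × List Int :=
      if rest ≠ [] ∧ c = 'x' ∧ rest.headD ' ' = 'Y' then (0, s2.2 ++ [s2.1 + 1]) else s2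
    -- if fire_list[i] == 'Y'
    let fc' : Int := if c = 'Y' then 0 else s3.1
    wbLoop rest fc' s3.2

def waterbombs (fire : String) (w : Int) : Int :=
  let fires_passed := wbLoop fire.toList 0 []
  fires_passed.foldl (fun acc f => acc + pvCeilDiv f w) 0

-- ===== PORT B =====
def waterbombs_alt (fire : String) (w : Int) : Int :=
  ((PySem.Str.split? fire "Y").getD []).foldl
    (fun acc group =>
      if PySem.Str.endswith group "x" then
        acc + -(PySem.Int.floordiv (-(PySem.Str.count group "x" : Int)) w)
      else acc) 0

-- ===== PRECONDITION & SPEC =====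
-- Pre_ excludes exactly the inputs where Python A raises ZeroDivisionError: w = 0 while some fire
-- group is flushed (an 'x' at the end of the string or immediately before a 'Y'); B raises there too.
def Pre_waterbombs (fire : String) (w : Int) : Prop :=
  w ≠ 0 ∨ (PySem.Str.endswith fire "x" = false ∧ PySem.Str.count fire "xY" = 0)
instance (fire : String) (w : Int) : Decidable (Pre_waterbombs fire w) := by
  unfold Pre_waterbombs; infer_instance

def pvWitness_waterbombs : String × Int := ("xxYx.x", 2)

def Spec_waterbombs (fire : String) (w : Int) (out : Int) : Prop := out = waterbombs_alt fire w
instance (fire : String) (w : Int) (out : Int) : Decidable (Spec_waterbombs fire w out) := by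
  unfold Spec_waterbombs; infer_instance

-- ===== CLAIM (what is proved, stated in full; the proofs are below) =====
def Claim_equal_waterbombs : Prop := ∀ (fire : String) (w : Int), Dom_waterbombs fire w → Pre_waterbombs fire w → Spec_waterbombs fire w (waterbombs fire w)

-- ===== LEMMAS AND PROOFS =====

-- modifyHead helpers for the splitOn characterisation
theorem pvModifyHead_id {α : Type} (l : List α) : l.modifyHead (fun x => x) = l := by
  cases l <;> simp

theorem pvModifyHead_congr {α : Type} (l : List α) (f g : α → α) (h : ∀ x, f x = g x) :
    l.modifyHead f = l.modifyHead g := by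
  cases l <;> simp [h]

-- PySem.Chars.count with a single-character needle is List.count
theorem pvCountGo_single (c : Char) : ∀ (s : List Char) (fuel acc : Nat), s.length ≤ fuel →
    PySem.Chars.count.go [c] fuel s acc = acc + s.count c := by
  intro s
  induction s with
  | nil => intro fuel acc _; cases fuel <;> simp [PySem.Chars.count.go]
  | cons d t ih =>
    intro fuel acc h
    cases fuel with
    | zero => simp at h
    | succ n =>
      by_cases hcd : c = d
      · subst hcd
        simp only [PySem.Chars.count.go]
        rw [if_pos (by simp [List.isPrefixOf])]
        simp only [List.length_cons, List.length_nil, List.drop_succ_cons, List.drop_zero]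
        rw [ih n (acc + 1) (by simpa using h)]
        simp
        omega
      · have hdc : ¬ d = c := fun h' => hcd h'.symm
        simp only [PySem.Chars.count.go]
        rw [if_neg (by simp [List.isPrefixOf, hcd])]
        rw [ih n acc (by simpa using h)]
        simp [hdc]

theorem pvCount_single (c : Char) (s : List Char) : PySem.Chars.count s [c] = s.count c := by
  simp [PySem.Chars.count, pvCountGo_single c s s.length 0 le_rfl]

-- PySem.Chars.splitOn with a single-character separator is List.splitOnP
theorem pvSplitGo_single (c : Char) : ∀ (l : List Char) (fuel : Nat) (cur : List Char)
    (acc : List (List Char)), l.length ≤ fuel →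
    PySem.Chars.splitOn.go [c] fuel l cur acc =
      acc.reverse ++ (l.splitOnP (· == c)).modifyHead (cur.reverse ++ ·) := by
  intro l
  induction l with
  | nil =>
    intro fuel cur acc _
    cases fuel <;> simp [PySem.Chars.splitOn.go, List.splitOnP_nil]
  | cons d t ih =>
    intro fuel cur acc h
    cases fuel with
    | zero => simp at h
    | succ n =>
      by_cases hcd : c = d
      · subst hcd
        simp only [PySem.Chars.splitOn.go]
        rw [if_pos (by simp [List.isPrefixOf])]
        simp only [List.length_cons, List.length_nil, List.drop_succ_cons, List.drop_zero]
        rw [ih n [] (cur.reverse :: acc) (by simpa using h)]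
        rw [List.splitOnP_cons]
        rw [if_pos (by simp)]
        simp [pvModifyHead_id]
      · have hdc : ¬ d = c := fun h' => hcd h'.symm
        simp only [PySem.Chars.splitOn.go]
        rw [if_neg (by simp [List.isPrefixOf, hcd])]
        rw [ih n (d :: cur) acc (by simpa using h)]
        rw [List.splitOnP_cons]
        rw [if_neg (by simp [hdc])]
        rw [List.modifyHead_modifyHead]
        congr 1
        apply pvModifyHead_congr
        intro x; simp

theorem pvSplit_single (c : Char) (s : List Char) :
    PySem.Chars.splitOn s [c] = s.splitOnP (· == c) := by
  have := pvSplitGo_single c s (s.length + 1) [] [] (by omega)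
  simpa [PySem.Chars.splitOn, pvModifyHead_id] using this

-- the flush list produced by A's loop, described per 'Y'-segment
def pvFlushes : List (List Char) → Int → List Int
  | [], _ => []
  | s :: rest, fc =>
      (if s.getLast? = some 'x' then [fc + (s.count 'x' : Int)] else []) ++ pvFlushes rest 0

theorem pvWbLoop_append (cs : List Char) : ∀ (fc : Int) (fp : List Int),
    wbLoop cs fc fp = fp ++ wbLoop cs fc [] := by
  induction cs with
  | nil => intro fc fp; simp [wbLoop]
  | cons c rest ih =>
    intro fc fp
    show wbLoop (c :: rest) fc fp = fp ++ wbLoop (c :: rest) fc []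
    simp only [wbLoop]
    split_ifs <;>
      first
        | (rw [ih]; (conv_rhs => rw [ih]); simp)
        | rw [ih]

theorem pvGetLast?_cons_of_ne_nil {α : Type} (c : α) (s : List α) (h : s ≠ []) :
    (c :: s).getLast? = s.getLast? := by
  obtain ⟨a, t, rfl⟩ := List.exists_cons_of_ne_nil h
  simp [List.getLast?_cons_cons]

-- one equation of wbLoop per shape of A's branch structure
theorem wbLoop_x_last (fc : Int) (fp : List Int) : wbLoop ['x'] fc fp = fp ++ [fc + 1] := by
  simp [wbLoop]

theorem wbLoop_x_Y (t : List Char) (fc : Int) (fp : List Int) :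
    wbLoop ('x' :: 'Y' :: t) fc fp = wbLoop ('Y' :: t) 0 (fp ++ [fc + 1]) := by
  simp [wbLoop]

theorem wbLoop_x_other (d : Char) (hd : d ≠ 'Y') (t : List Char) (fc : Int) (fp : List Int) :
    wbLoop ('x' :: d :: t) fc fp = wbLoop (d :: t) (fc + 1) fp := by
  simp [wbLoop, hd]

theorem wbLoop_Y (t : List Char) (fc : Int) (fp : List Int) :
    wbLoop ('Y' :: t) fc fp = wbLoop t 0 fp := by
  simp [wbLoop]

theorem wbLoop_other (c : Char) (hx : c ≠ 'x') (hY : c ≠ 'Y') (t : List Char) (fc : Int)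
    (fp : List Int) : wbLoop (c :: t) fc fp = wbLoop t fc fp := by
  simp [wbLoop, hx, hY]

theorem pvWbLoop_eq_flushes (cs : List Char) : ∀ (fc : Int),
    wbLoop cs fc [] = pvFlushes (cs.splitOnP (· == 'Y')) fc := by
  induction cs with
  | nil => intro fc; simp [wbLoop, List.splitOnP_nil, pvFlushes]
  | cons c rest ih =>
    intro fc
    by_cases hY : c = 'Y'
    · -- 'Y' resets the counter and starts a new segment
      subst hY
      rw [wbLoop_Y, ih 0, List.splitOnP_cons, if_pos (by simp)]
      simp [pvFlushes]
    by_cases hx : c = 'x'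
    · subst hx
      rcases rest with _ | ⟨d, t⟩
      · -- 'x' as last character: flush fc + 1
        rw [wbLoop_x_last]
        simp [List.splitOnP_cons, List.splitOnP_nil, pvFlushes]
      have h2 : List.splitOnP (· == 'Y') ('Y' :: t) = [] :: List.splitOnP (· == 'Y') t := by
        rw [List.splitOnP_cons, if_pos (by simp)]
      by_cases hd : d = 'Y'
      · -- 'x' immediately before 'Y': flush fc + 1 and reset
        subst hd
        have h1 := ih 0
        rw [wbLoop_Y] at h1
        rw [wbLoop_x_Y, wbLoop_Y, pvWbLoop_append, h1, h2]
        rw [List.splitOnP_cons, if_neg (by simp)]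
        rw [h2]
        simp [pvFlushes]
      · -- 'x' inside a segment: the counter carries over
        obtain ⟨s0, r0, hs0⟩ := List.exists_cons_of_ne_nil (List.splitOnP_ne_nil (· == 'Y') t)
        have hsplit : List.splitOnP (· == 'Y') (d :: t) = (d :: s0) :: r0 := by
          rw [List.splitOnP_cons, if_neg (by simp [hd]), hs0, List.modifyHead_cons]
        rw [wbLoop_x_other d hd, ih (fc + 1), hsplit]
        rw [List.splitOnP_cons, if_neg (by simp), hsplit, List.modifyHead_cons]
        simp only [pvFlushes]
        rw [pvGetLast?_cons_of_ne_nil 'x' (d :: s0) (by simp)]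
        by_cases hlast : (d :: s0).getLast? = some 'x'
        · rw [if_pos hlast, if_pos hlast]
          simp [List.count_cons]
          ring
        · rw [if_neg hlast, if_neg hlast]
    · -- any other character: state unchanged
      rcases rest with _ | ⟨d, t⟩
      · rw [wbLoop_other c hx hY]
        simp [wbLoop, List.splitOnP_cons, List.splitOnP_nil, pvFlushes, hY, hx]
      obtain ⟨s, r, hsr⟩ := List.exists_cons_of_ne_nil (List.splitOnP_ne_nil (· == 'Y') (d :: t))
      rw [wbLoop_other c hx hY, ih fc, hsr]
      rw [List.splitOnP_cons, if_neg (by simp [hY]), hsr, List.modifyHead_cons]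
      simp only [pvFlushes]
      rcases s with _ | ⟨e, s1⟩
      · simp [hx]
      · rw [pvGetLast?_cons_of_ne_nil c (e :: s1) (by simp)]
        simp [List.count_cons, hx]

theorem pvSuffix_singleton (s : List Char) (c : Char) : [c] <:+ s ↔ s.getLast? = some c := by
  constructor
  · rintro ⟨t, rfl⟩; simp
  · intro h
    rcases List.eq_nil_or_concat s with rfl | ⟨t, a, rfl⟩
    · simp at h
    · simp at h
      subst h
      exact ⟨t, by simp⟩

theorem pvEndswith_single (s : List Char) (c : Char) :
    PySem.Chars.endswith s [c] = true ↔ s.getLast? = some c := by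
  rw [PySem.Chars.endswith_iff, pvSuffix_singleton]

-- B's fold over the segments computes the same sum as A's fold over the flush list
theorem pvFold_eq (w : Int) : ∀ (segs : List (List Char)) (init : Int),
    (segs.map String.ofList).foldl
      (fun acc group =>
        if PySem.Str.endswith group "x" then
          acc + -(PySem.Int.floordiv (-(PySem.Str.count group "x" : Int)) w)
        else acc) init
    = (pvFlushes segs 0).foldl (fun acc f => acc + pvCeilDiv f w) init := by
  intro segs
  induction segs with
  | nil => intro init; simp [pvFlushes]
  | cons s rest ih =>
    intro init
    simp only [List.map_cons, List.foldl_cons, pvFlushes, List.foldl_append]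
    have hend : PySem.Str.endswith (String.ofList s) "x" = PySem.Chars.endswith s ['x'] := by
      simp [PySem.Str.endswith]
    have hcnt : (PySem.Str.count (String.ofList s) "x" : Int) = (s.count 'x' : Int) := by
      simp [PySem.Str.count, pvCount_single]
    rw [hend, hcnt]
    by_cases hlast : s.getLast? = some 'x'
    · rw [if_pos ((pvEndswith_single s 'x').mpr hlast), if_pos hlast]
      rw [ih]
      simp [pvCeilDiv]
    · have hne : ¬ PySem.Chars.endswith s ['x'] = true :=
        fun h => hlast ((pvEndswith_single s 'x').mp h)
      rw [if_neg hne, if_neg hlast]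
      exact ih init

-- ===== VERDICT (by name: the statement is the Claim_ definition above) =====
theorem waterbombs_spec : Claim_equal_waterbombs := by
  intro fire w _ _
  unfold Spec_waterbombs waterbombs waterbombs_alt
  rw [pvWbLoop_eq_flushes]
  simp only [PySem.Str.split?, PySem.Chars.split?]
  rw [if_neg (by decide)]
  simp only [Option.map_some, Option.getD_some]
  rw [show ("Y" : String).toList = ['Y'] from rfl, pvSplit_single]
  rw [show fire.toList.splitOnP (· == 'Y') = List.splitOnP (· == 'Y') fire.toList from rfl]
  exact (pvFold_eq w (List.splitOnP (· == 'Y') fire.toList) 0).symm
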